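-- pv_equiv track=rewrite | github.com/RoqueArroyo/practicaEnPython | teseracto_1_(encontrar-celdas).py | encontrar_celdas
-- ===== SOURCE A (Python) =====
-- def encontrar_celdas(vertices):
--     celdas = []
--     for i in range(4):  # para cada coordenada
--         for val in [0, 1]:  # fijar coordenada a 0 o 1
--             celda = []
--             for vertice in vertices:
--                 if vertice[i] == val:
--                     celda.append(vertice)
--             celdas.append(celda)
--     return celdas
-- ===== SOURCE B (Python) =====
-- def encontrar_celdas(vertices):
--     celdas = [[] for _ in range(8)]
--     for vertice in vertices:
--         for i in range(4):
--             v = vertice[i]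
--             if v == 0:
--                 celdas[2 * i].append(vertice)
--             elif v == 1:
--                 celdas[2 * i + 1].append(vertice)
--     return celdas
-- ===== Notes on version B (the rewrite author's own statement) =====
-- stated objective: alternative
-- what changed: B makes a single distributing pass over the vertices into 8 pre-created buckets instead of A's 8 separate filtering scans of the vertex list.
import Mathlib
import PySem

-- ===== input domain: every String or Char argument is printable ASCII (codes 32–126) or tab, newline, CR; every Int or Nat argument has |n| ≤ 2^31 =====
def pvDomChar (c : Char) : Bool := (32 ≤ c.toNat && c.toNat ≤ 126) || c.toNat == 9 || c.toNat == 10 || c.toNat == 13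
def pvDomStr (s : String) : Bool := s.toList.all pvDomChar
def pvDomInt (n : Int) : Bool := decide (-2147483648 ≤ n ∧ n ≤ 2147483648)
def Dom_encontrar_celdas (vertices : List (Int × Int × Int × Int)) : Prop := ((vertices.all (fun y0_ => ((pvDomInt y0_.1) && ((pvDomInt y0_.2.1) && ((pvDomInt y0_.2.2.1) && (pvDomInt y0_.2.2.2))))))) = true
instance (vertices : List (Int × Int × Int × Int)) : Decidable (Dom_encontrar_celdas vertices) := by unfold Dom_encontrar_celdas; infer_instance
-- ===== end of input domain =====

-- B replaces A's 8 filtering scans of the vertex list by one distributing pass into 8 pre-created buckets (same output, same order).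

-- tuple indexing vertice[i] for i = 0..3 (both Pythons only index with 0..3)
def pvCoord (v : Int × Int × Int × Int) (i : Int) : Int :=
  if i = 0 then v.1 else if i = 1 then v.2.1 else if i = 2 then v.2.2.1 else v.2.2.2

-- ===== PORT A =====
def encontrar_celdas (vertices : List (Int × Int × Int × Int)) : List (List (Int × Int × Int × Int)) :=
  (PySem.List.pyRange 0 4 1).foldl (fun celdas i =>
    ([0, 1] : List Int).foldl (fun celdas val =>
      celdas ++ [vertices.foldl (fun celda vertice =>
        if pvCoord vertice i = val then celda ++ [vertice] else celda) []]) celdas) []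

-- ===== PORT B =====
-- celdas[k].append(x)
def pvAppendAt (cs : List (List (Int × Int × Int × Int))) (k : Nat) (x : Int × Int × Int × Int) :
    List (List (Int × Int × Int × Int)) :=
  cs.modify k (fun c => c ++ [x])

def encontrar_celdas_alt (vertices : List (Int × Int × Int × Int)) : List (List (Int × Int × Int × Int)) :=
  vertices.foldl (fun celdas vertice =>
    (PySem.List.pyRange 0 4 1).foldl (fun celdas i =>
      let v := pvCoord vertice i
      if v = 0 then pvAppendAt celdas (2 * i.toNat) vertice
      else if v = 1 then pvAppendAt celdas (2 * i.toNat + 1) vertice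
      else celdas) celdas)
    [[], [], [], [], [], [], [], []]

-- ===== PRECONDITION & SPEC =====
def Spec_encontrar_celdas (vertices : List (Int × Int × Int × Int)) (out : List (List (Int × Int × Int × Int))) : Prop := out = encontrar_celdas_alt vertices
instance (vertices : List (Int × Int × Int × Int)) (out : List (List (Int × Int × Int × Int))) : Decidable (Spec_encontrar_celdas vertices out) := by unfold Spec_encontrar_celdas; infer_instance

-- ===== CLAIM (what is proved, stated in full; the proofs are below) =====
def Claim_equal_encontrar_celdas : Prop := ∀ (vertices : List (Int × Int × Int × Int)), Dom_encontrar_celdas vertices → Spec_encontrar_celdas vertices (encontrar_celdas vertices)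

-- ===== LEMMAS AND PROOFS =====

-- the "hit list" contributed by one vertex to the bucket (coordinate i, value val)
def pvHit (i val : Int) (x : Int × Int × Int × Int) : List (Int × Int × Int × Int) :=
  if pvCoord x i = val then [x] else []

-- A's inner scan is init ++ filter; stated via pvHit for composability
theorem pvA_inner (i val : Int) (vs : List (Int × Int × Int × Int)) (init : List (Int × Int × Int × Int)) :
    vs.foldl (fun celda vertice => if pvCoord vertice i = val then celda ++ [vertice] else celda) init
      = init ++ vs.flatMap (pvHit i val) := by
  induction vs generalizing init with
  | nil => simp
  | cons x xs ih =>
    simp only [List.foldl_cons, List.flatMap_cons, pvHit]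
    by_cases h : pvCoord x i = val <;> simp [h, ih]

theorem pvA_closed (vs : List (Int × Int × Int × Int)) :
    encontrar_celdas vs =
      [vs.flatMap (pvHit 0 0), vs.flatMap (pvHit 0 1),
       vs.flatMap (pvHit 1 0), vs.flatMap (pvHit 1 1),
       vs.flatMap (pvHit 2 0), vs.flatMap (pvHit 2 1),
       vs.flatMap (pvHit 3 0), vs.flatMap (pvHit 3 1)] := by
  have hr : PySem.List.pyRange 0 4 1 = [0, 1, 2, 3] := by decide
  simp only [encontrar_celdas, hr, List.foldl_cons, List.foldl_nil, pvA_inner]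
  simp

-- one B-step on an explicit 8-tuple of buckets
set_option maxHeartbeats 1000000 in
theorem pvB_step (x : Int × Int × Int × Int) (a0 a1 a2 a3 a4 a5 a6 a7 : List (Int × Int × Int × Int)) :
    (PySem.List.pyRange 0 4 1).foldl (fun celdas i =>
      let v := pvCoord x i
      if v = 0 then pvAppendAt celdas (2 * i.toNat) x
      else if v = 1 then pvAppendAt celdas (2 * i.toNat + 1) x
      else celdas) [a0, a1, a2, a3, a4, a5, a6, a7]
    = [a0 ++ pvHit 0 0 x, a1 ++ pvHit 0 1 x, a2 ++ pvHit 1 0 x, a3 ++ pvHit 1 1 x,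
       a4 ++ pvHit 2 0 x, a5 ++ pvHit 2 1 x, a6 ++ pvHit 3 0 x, a7 ++ pvHit 3 1 x] := by
  have hr : PySem.List.pyRange 0 4 1 = [0, 1, 2, 3] := by decide
  simp only [hr, List.foldl_cons, List.foldl_nil, pvHit, pvAppendAt, pvCoord]
  norm_num
  split_ifs <;> simp_all [List.modify]

theorem pvB_closed (vs : List (Int × Int × Int × Int))
    (a0 a1 a2 a3 a4 a5 a6 a7 : List (Int × Int × Int × Int)) :
    vs.foldl (fun celdas vertice =>
      (PySem.List.pyRange 0 4 1).foldl (fun celdas i =>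
        let v := pvCoord vertice i
        if v = 0 then pvAppendAt celdas (2 * i.toNat) vertice
        else if v = 1 then pvAppendAt celdas (2 * i.toNat + 1) vertice
        else celdas) celdas) [a0, a1, a2, a3, a4, a5, a6, a7]
    = [a0 ++ vs.flatMap (pvHit 0 0), a1 ++ vs.flatMap (pvHit 0 1),
       a2 ++ vs.flatMap (pvHit 1 0), a3 ++ vs.flatMap (pvHit 1 1),
       a4 ++ vs.flatMap (pvHit 2 0), a5 ++ vs.flatMap (pvHit 2 1),
       a6 ++ vs.flatMap (pvHit 3 0), a7 ++ vs.flatMap (pvHit 3 1)] := by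
  induction vs generalizing a0 a1 a2 a3 a4 a5 a6 a7 with
  | nil => simp
  | cons x xs ih =>
    simp only [List.foldl_cons, pvB_step, ih, List.flatMap_cons, List.append_assoc]

-- ===== VERDICT (by name: the statement is the Claim_ definition above) =====
theorem encontrar_celdas_spec : Claim_equal_encontrar_celdas := by
  intro vs _
  unfold Spec_encontrar_celdas encontrar_celdas_alt
  rw [pvA_closed, pvB_closed]
  simp
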